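-- pv_equiv track=rewrite | github.com/shageenthsandrakumar/Project-Euler | problem_029/solution_4.py | count_distinct_exponents
-- ===== SOURCE A (Python) =====
-- from math import log2, gcd
-- from itertools import combinations
--
-- def lcm_list(numbers):
--     result = 1
--     for number in numbers:
--         result *= number//gcd(number, result)
--     return result
--
-- def count_distinct_exponents(powers,lower_bound,upper_bound):
--     total = 0
--     for size in range(len(powers)):
--         for subset in combinations(powers, size+1):
--             m = lcm_list(list(subset))
--             lower = lower_bound * max(subset)
--             upper = upper_bound * min(subset)
--             total += (-1)**(size)*(upper // m - (lower - 1) // m)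
--     return total
-- ===== SOURCE B (Python) =====
-- from math import gcd
--
-- def count_distinct_exponents(powers, lower_bound, upper_bound):
--     # One DFS over the list instead of size-grouped itertools.combinations:
--     # each chosen subset's (sign, lcm, max, min) is carried incrementally.
--     def go(items, sign, m, mx, mn):
--         if not items:
--             return sign * ((upper_bound * mn) // m - (lower_bound * mx - 1) // m)
--         p, rest = items[0], items[1:]
--         return go(rest, sign, m, mx, mn) + go(rest, -sign, m * (p // gcd(p, m)), max(mx, p), min(mn, p))
--
--     def top(items):
--         if not items:
--             return 0
--         p, rest = items[0], items[1:]
--         return top(rest) + go(rest, 1, p, p, p)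
--
--     return top(powers)
-- ===== Notes on version B (the rewrite author's own statement) =====
-- stated objective: alternative
-- what changed: replaces the size-grouped itertools.combinations enumeration (which materializes every subset as a tuple/list and recomputes lcm, max and min from scratch per subset) with a single DFS recursion over the list that carries (sign, lcm, max, min) incrementally across shared prefixes
import Mathlib
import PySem

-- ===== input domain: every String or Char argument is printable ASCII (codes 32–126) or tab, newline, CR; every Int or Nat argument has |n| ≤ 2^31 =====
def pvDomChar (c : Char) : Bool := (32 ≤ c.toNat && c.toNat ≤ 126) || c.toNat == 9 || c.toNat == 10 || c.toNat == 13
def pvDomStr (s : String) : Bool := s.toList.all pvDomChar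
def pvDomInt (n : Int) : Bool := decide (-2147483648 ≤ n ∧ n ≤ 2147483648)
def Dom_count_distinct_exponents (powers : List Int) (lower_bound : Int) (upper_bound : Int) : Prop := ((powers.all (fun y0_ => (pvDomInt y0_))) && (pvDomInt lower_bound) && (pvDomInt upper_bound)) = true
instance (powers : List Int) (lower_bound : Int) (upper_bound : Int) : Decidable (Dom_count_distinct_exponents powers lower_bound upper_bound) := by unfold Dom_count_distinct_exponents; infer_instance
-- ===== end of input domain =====

-- B replaces the size-grouped combinations enumeration of A by one DFS recursion that
-- carries (sign, lcm, max, min) of the chosen subset incrementally (objective: alternative).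


-- ===== PORT A =====
-- lcm_list: result = 1; for number in numbers: result *= number // gcd(number, result)
def pvLcmList (numbers : List Int) : Int :=
  numbers.foldl (fun result number => result * PySem.Int.floordiv number ((Int.gcd number result : Nat) : Int)) 1

-- itertools.combinations(l, k), in itertools' lexicographic order over positions
def pvComb (k : Nat) (l : List Int) : List (List Int) :=
  match k, l with
  | 0, _ => [[]]
  | _ + 1, [] => []
  | k + 1, x :: xs => (pvComb k xs).map (fun s => x :: s) ++ pvComb (k + 1) xs

-- Python max(s) / min(s) on a nonempty sequence (value at [] is junk; A only applies them to nonempty subsets)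
def pvMax (l : List Int) : Int := match l with | [] => 0 | x :: xs => xs.foldl max x
def pvMin (l : List Int) : Int := match l with | [] => 0 | x :: xs => xs.foldl min x

def count_distinct_exponents (powers : List Int) (lower_bound : Int) (upper_bound : Int) : Int :=
  (List.range powers.length).foldl (fun total size =>
    (pvComb (size + 1) powers).foldl (fun total subset =>
      let m := pvLcmList subset
      let lower := lower_bound * pvMax subset
      let upper := upper_bound * pvMin subset
      total + (-1 : Int) ^ size * (PySem.Int.floordiv upper m - PySem.Int.floordiv (lower - 1) m)) total) 0

-- ===== PORT B =====
-- go(items, sign, m, mx, mn): sum of signed terms over every extension of the current chosen subset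
def pvGo (lb ub : Int) (items : List Int) (sign m mx mn : Int) : Int :=
  match items with
  | [] => sign * (PySem.Int.floordiv (ub * mn) m - PySem.Int.floordiv (lb * mx - 1) m)
  | p :: rest =>
      pvGo lb ub rest sign m mx mn +
      pvGo lb ub rest (-sign) (m * PySem.Int.floordiv p ((Int.gcd p m : Nat) : Int)) (max mx p) (min mn p)

-- top(items): sum over the choice of the first chosen element
def pvTop (lb ub : Int) (items : List Int) : Int :=
  match items with
  | [] => 0
  | p :: rest => pvTop lb ub rest + pvGo lb ub rest 1 p p p

def count_distinct_exponents_alt (powers : List Int) (lower_bound : Int) (upper_bound : Int) : Int :=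
  pvTop lower_bound upper_bound powers

-- ===== PRECONDITION & SPEC =====
-- Pre_ excludes exactly the inputs where Python A raises: a 0 among powers makes the lcm 0 and
-- the subsequent '// m' a ZeroDivisionError (B's recursion raises there too).
def Pre_count_distinct_exponents (powers : List Int) (lower_bound : Int) (upper_bound : Int) : Prop :=
  (0 : Int) ∉ powers
instance (powers : List Int) (lower_bound : Int) (upper_bound : Int) : Decidable (Pre_count_distinct_exponents powers lower_bound upper_bound) := by unfold Pre_count_distinct_exponents; infer_instance

def pvWitness_count_distinct_exponents : List Int × Int × Int := ([2, 3, 4, 5], 2, 5)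

def Spec_count_distinct_exponents (powers : List Int) (lower_bound : Int) (upper_bound : Int) (out : Int) : Prop := out = count_distinct_exponents_alt powers lower_bound upper_bound
instance (powers : List Int) (lower_bound : Int) (upper_bound : Int) (out : Int) : Decidable (Spec_count_distinct_exponents powers lower_bound upper_bound out) := by unfold Spec_count_distinct_exponents; infer_instance

-- ===== CLAIM (what is proved, stated in full; the proofs are below) =====
def Claim_equal_count_distinct_exponents : Prop := ∀ (powers : List Int) (lower_bound : Int) (upper_bound : Int), Dom_count_distinct_exponents powers lower_bound upper_bound → Pre_count_distinct_exponents powers lower_bound upper_bound → Spec_count_distinct_exponents powers lower_bound upper_bound (count_distinct_exponents powers lower_bound upper_bound)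

-- ===== LEMMAS AND PROOFS =====

-- all sublists of l (each preserving l's order), in the order B's `go` recursion visits them
def pvSubs (l : List Int) : List (List Int) :=
  match l with
  | [] => [[]]
  | p :: r => pvSubs r ++ (pvSubs r).map (fun S => p :: S)

-- sum of w over all NONEMPTY sublists, grouped by first chosen element (B's `top` shape)
def pvNE (w : List Int → Int) (l : List Int) : Int :=
  match l with
  | [] => 0
  | p :: r => pvNE w r + ((pvSubs r).map (fun S => w (p :: S))).sum

-- the state B carries, as a fold
def pvStep (st : Int × Int × Int × Int) (p : Int) : Int × Int × Int × Int :=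
  (-st.1, st.2.1 * PySem.Int.floordiv p ((Int.gcd p st.2.1 : Nat) : Int), max st.2.2.1 p, min st.2.2.2 p)

def pvTermSt (lb ub : Int) (st : Int × Int × Int × Int) : Int :=
  st.1 * (PySem.Int.floordiv (ub * st.2.2.2) st.2.1 - PySem.Int.floordiv (lb * st.2.2.1 - 1) st.2.1)

-- the weight of one nonempty subset, as A computes it
def pvW (lb ub : Int) (S : List Int) : Int :=
  (-1 : Int) ^ (S.length - 1) *
    (PySem.Int.floordiv (ub * pvMin S) (pvLcmList S) - PySem.Int.floordiv (lb * pvMax S - 1) (pvLcmList S))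

lemma pvGo_eq_sum (lb ub : Int) (l : List Int) (st : Int × Int × Int × Int) :
    pvGo lb ub l st.1 st.2.1 st.2.2.1 st.2.2.2 =
      ((pvSubs l).map (fun S => pvTermSt lb ub (S.foldl pvStep st))).sum := by
  induction l generalizing st with
  | nil => simp [pvGo, pvSubs, pvTermSt]
  | cons p r ih =>
      simp only [pvGo, pvSubs, List.map_append, List.sum_append, List.map_map]
      rw [ih st]
      congr 1
      have h2 := ih (pvStep st p)
      simp only [pvStep] at h2
      rw [h2]
      apply congrArg List.sum
      apply List.map_congr_left
      intro S _
      rfl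

lemma pvRun_eq (S : List Int) (sign m mx mn : Int) :
    S.foldl pvStep (sign, m, mx, mn) =
      ((-1 : Int) ^ S.length * sign,
       S.foldl (fun result number => result * PySem.Int.floordiv number ((Int.gcd number result : Nat) : Int)) m,
       S.foldl max mx, S.foldl min mn) := by
  induction S generalizing sign m mx mn with
  | nil => simp
  | cons q T ih =>
      simp only [List.foldl_cons, pvStep, ih]
      congr 1
      rw [List.length_cons, pow_succ]
      ring

lemma pvTermSt_init (lb ub p : Int) (S : List Int) :
    pvTermSt lb ub (S.foldl pvStep (1, p, p, p)) = pvW lb ub (p :: S) := by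
  rw [pvRun_eq]
  simp only [pvTermSt, pvW, pvLcmList, pvMax, pvMin, List.foldl_cons, List.length_cons,
    Nat.add_sub_cancel, mul_one]
  have h1 : (1 : Int) * PySem.Int.floordiv p ((Int.gcd p 1 : Nat) : Int) = p := by
    simp [PySem.Int.floordiv]
  rw [h1]

-- B's port computes the pvNE sum of A's subset weights
lemma pvTop_eq_NE (lb ub : Int) (l : List Int) :
    pvTop lb ub l = pvNE (pvW lb ub) l := by
  induction l with
  | nil => rfl
  | cons p r ih =>
      simp only [pvTop, pvNE, ih]
      congr 1
      have := pvGo_eq_sum lb ub r ((1 : Int), p, p, p)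
      rw [this]
      congr 1
      apply List.map_congr_left
      intro S _
      exact pvTermSt_init lb ub p S

lemma pvComb_length {k : Nat} {l S : List Int} (h : S ∈ pvComb k l) : S.length = k := by
  induction l generalizing k S with
  | nil =>
      cases k with
      | zero => simp [pvComb] at h; simp [h]
      | succ k => simp [pvComb] at h
  | cons x xs ih =>
      cases k with
      | zero => simp [pvComb] at h; simp [h]
      | succ k =>
          simp only [pvComb, List.mem_append, List.mem_map] at h
          rcases h with ⟨T, hT, rfl⟩ | h
          · simp [ih hT]
          · exact ih h

lemma pvComb_eq_nil {k : Nat} {l : List Int} (h : l.length < k) : pvComb k l = [] := by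
  induction l generalizing k with
  | nil => cases k with
      | zero => omega
      | succ k => rfl
  | cons x xs ih =>
      cases k with
      | zero => omega
      | succ k =>
          simp only [pvComb]
          rw [ih (by simpa using h), ih (by simp at h; omega)]
          rfl

lemma pvSubs_sum (w : List Int → Int) (l : List Int) :
    ((pvSubs l).map w).sum = w [] + pvNE w l := by
  induction l generalizing w with
  | nil => simp [pvSubs, pvNE]
  | cons p r ih =>
      simp only [pvSubs, pvNE, List.map_append, List.sum_append, List.map_map, ih w]
      ring_nf
      rfl

lemma pvComb_sum (l : List Int) (w : List Int → Int) :
    ((List.range l.length).map (fun k => ((pvComb (k + 1) l).map w).sum)).sum = pvNE w l := by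
  induction l generalizing w with
  | nil => rfl
  | cons x xs ih =>
      have hsplit : ∀ k : Nat,
          ((pvComb (k + 1) (x :: xs)).map w).sum =
            ((pvComb k xs).map (fun S => w (x :: S))).sum + ((pvComb (k + 1) xs).map w).sum := by
        intro k
        simp [pvComb, Function.comp_def]
      simp only [List.length_cons, hsplit]
      rw [PySem.List.sum_map_add_int]
      have hb : ((List.range (xs.length + 1)).map (fun k => ((pvComb (k + 1) xs).map w).sum)).sum
          = pvNE w xs := by
        rw [List.range_succ]
        simp only [List.map_append, List.sum_append, List.map_cons, List.map_nil]
        rw [pvComb_eq_nil (by omega)]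
        simpa using ih w
      have ha : ((List.range (xs.length + 1)).map
            (fun k => ((pvComb k xs).map (fun S => w (x :: S))).sum)).sum
          = ((pvSubs xs).map (fun S => w (x :: S))).sum := by
        rw [List.range_succ_eq_map]
        simp only [List.map_cons, List.sum_cons, List.map_map]
        have h0 : ((pvComb 0 xs).map (fun S => w (x :: S))).sum = w [x] := by
          simp [pvComb]
        rw [h0]
        have : ((List.range xs.length).map
              ((fun k => ((pvComb k xs).map (fun S => w (x :: S))).sum) ∘ Nat.succ)).sum
            = pvNE (fun S => w (x :: S)) xs := ih (fun S => w (x :: S))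
        rw [this, pvSubs_sum (fun S => w (x :: S)) xs]
      rw [ha, hb]
      simp [pvNE]
      ring
  
-- A's nested folds are the sum of pvW over all combinations
lemma portA_eq_sum (powers : List Int) (lb ub : Int) :
    count_distinct_exponents powers lb ub =
      ((List.range powers.length).map
        (fun k => ((pvComb (k + 1) powers).map (pvW lb ub)).sum)).sum := by
  unfold count_distinct_exponents
  have hinner : ∀ (size : Nat) (total : Int),
      (pvComb (size + 1) powers).foldl (fun total subset =>
        let m := pvLcmList subset
        let lower := lb * pvMax subset
        let upper := ub * pvMin subset
        total + (-1 : Int) ^ size * (PySem.Int.floordiv upper m - PySem.Int.floordiv (lower - 1) m)) total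
      = total + ((pvComb (size + 1) powers).map (pvW lb ub)).sum := by
    intro size total
    rw [PySem.List.foldl_add]
    congr 1
    refine congrArg List.sum ?_
    apply List.map_congr_left
    intro S hS
    have hlen : S.length = size + 1 := pvComb_length hS
    simp only [pvW, hlen, Nat.add_sub_cancel]
  have houter : (List.range powers.length).foldl (fun total size =>
      (pvComb (size + 1) powers).foldl (fun total subset =>
        let m := pvLcmList subset
        let lower := lb * pvMax subset
        let upper := ub * pvMin subset
        total + (-1 : Int) ^ size * (PySem.Int.floordiv upper m - PySem.Int.floordiv (lower - 1) m)) total) 0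
      = (List.range powers.length).foldl (fun total size =>
          total + ((pvComb (size + 1) powers).map (pvW lb ub)).sum) 0 := by
    apply PySem.List.foldl_congr_mem
    intro total size _
    exact hinner size total
  rw [houter, PySem.List.foldl_add]
  simp

-- ===== VERDICT (by name: the statement is the Claim_ definition above) =====
theorem count_distinct_exponents_spec : Claim_equal_count_distinct_exponents := by
  intro powers lb ub _dom _pre
  unfold Spec_count_distinct_exponents count_distinct_exponents_alt
  rw [portA_eq_sum, pvComb_sum, pvTop_eq_NE]
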